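-- pv_equiv track=rewrite | github.com/peanutzhen/leetcode | solutions/__152_min_employee.py | minEmployee
-- ===== SOURCE A (Python) =====
-- def minEmployee(nums):
-- 	n = len(nums)
-- 	nums.sort()
-- 	rtv = 0
--
-- 	i, j = 0, 0
-- 	while i < n:
-- 		val = nums[i]
-- 		while j < n and nums[j] == val and j-i-1 < val:
-- 			j = j + 1
-- 		rtv = rtv + val + 1
-- 		i = j
--
-- 	return rtv
-- ===== SOURCE B (Python) =====
-- def minEmployee(nums):
-- 	# One-pass fold over the sorted list with (total, prev, count) state;
-- 	# keeps A's in-place nums.sort() side effect.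
-- 	nums.sort()
-- 	total = 0
-- 	prev = None
-- 	count = 0
-- 	for v in nums:
-- 		if prev is not None and v == prev:
-- 			count += 1
-- 		else:
-- 			if prev is not None:
-- 				total += ((count + prev) // (prev + 1)) * (prev + 1)
-- 			prev = v
-- 			count = 1
-- 	if prev is not None:
-- 		total += ((count + prev) // (prev + 1)) * (prev + 1)
-- 	return total
-- ===== Notes on version B (the rewrite author's own statement) =====
-- stated objective: alternative
-- what changed: Replaced A's nested index while-loops, which pay (val+1) once per chunk of at most val+1 equal elements, by a single state-machine fold over the sorted list that adds each run's whole contribution with the closed form ((count+v)//(v+1))*(v+1); Pre_ excludes lists containing a negative value, on which A's outer loop never advances and A loops forever (it never returns), while B would divide by zero or miscount there.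
import Mathlib
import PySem

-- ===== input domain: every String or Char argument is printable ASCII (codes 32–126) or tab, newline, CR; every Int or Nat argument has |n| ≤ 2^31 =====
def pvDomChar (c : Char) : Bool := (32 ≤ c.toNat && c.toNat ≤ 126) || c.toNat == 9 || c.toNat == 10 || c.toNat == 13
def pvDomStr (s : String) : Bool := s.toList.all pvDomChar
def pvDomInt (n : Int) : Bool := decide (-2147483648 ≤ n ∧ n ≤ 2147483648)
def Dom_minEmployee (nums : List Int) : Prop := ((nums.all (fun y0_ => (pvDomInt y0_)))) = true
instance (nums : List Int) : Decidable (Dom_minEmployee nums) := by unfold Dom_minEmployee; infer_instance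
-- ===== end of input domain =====

-- B replaces A's nested chunk-counting while-loops by a single fold with a closed-form
-- per-run contribution; both Pythons sort `nums` in place (the equivalence proved is about the return value).

-- ===== PORT A =====
-- inner `while j < n and nums[j] == val and j-i-1 < val: j += 1` (fuel = list length suffices inside Pre_)
def aInner (s : List Int) (n val i j : Int) : Nat → Int
  | 0 => j
  | fuel + 1 =>
    if j < n ∧ PySem.List.pyGetD s j 0 = val ∧ j - i - 1 < val then
      aInner s n val i (j + 1) fuel
    else j

-- outer `while i < n:` loop of A (fuel = list length + 1 suffices inside Pre_)
def aOuter (s : List Int) (n : Int) : Nat → Int → Int → Int → Int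
  | 0, _, _, rtv => rtv
  | fuel + 1, i, j, rtv =>
    if i < n then
      let val := PySem.List.pyGetD s i 0
      let j' := aInner s n val i j s.length
      aOuter s n fuel j' j' (rtv + val + 1)
    else rtv

def minEmployee (nums : List Int) : Int :=
  let n : Int := nums.length
  let s := PySem.List.sorted nums (fun x => x) false
  aOuter s n (nums.length + 1) 0 0 0

-- ===== PORT B =====
-- one step of B's `for v in nums:` loop; state = (total, prev, count)
def bStep (st : Int × Option Int × Int) (v : Int) : Int × Option Int × Int :=
  match st with
  | (total, some p, count) =>
    if v = p then (total, some p, count + 1)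
    else (total + PySem.Int.floordiv (count + p) (p + 1) * (p + 1), some v, 1)
  | (total, none, _) => (total, some v, 1)

-- B's final flush after the loop
def bFlush (st : Int × Option Int × Int) : Int :=
  match st with
  | (total, some p, count) => total + PySem.Int.floordiv (count + p) (p + 1) * (p + 1)
  | (total, none, _) => total

def minEmployee_alt (nums : List Int) : Int :=
  let s := PySem.List.sorted nums (fun x => x) false
  bFlush (s.foldl bStep (0, none, 0))

-- ===== PRECONDITION & SPEC =====
-- Pre_ excludes lists containing a negative value: there A's outer loop never advances
-- (the inner guard 'j-i-1 < val' is immediately false for val < 0), so A loops forever and never returns.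
def Pre_minEmployee (nums : List Int) : Prop := ∀ x ∈ nums, 0 ≤ x
instance (nums : List Int) : Decidable (Pre_minEmployee nums) := by unfold Pre_minEmployee; infer_instance
def pvWitness_minEmployee : List Int := [1, 0, 1]

def Spec_minEmployee (nums : List Int) (out : Int) : Prop := out = minEmployee_alt nums
instance (nums : List Int) (out : Int) : Decidable (Spec_minEmployee nums out) := by unfold Spec_minEmployee; infer_instance

-- ===== CLAIM (what is proved, stated in full; the proofs are below) =====
def Claim_equal_minEmployee : Prop := ∀ (nums : List Int), Dom_minEmployee nums → Pre_minEmployee nums → Spec_minEmployee nums (minEmployee nums)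

-- ===== LEMMAS AND PROOFS =====

-- length of the leading run of value v
def leadRun (v : Int) : List Int → Nat
  | [] => 0
  | x :: t => if x = v then leadRun v t + 1 else 0

-- run-structured reference value: both ports are reduced to G of the sorted list
def G : List Int → Int
  | [] => 0
  | v :: t =>
    PySem.Int.floordiv (((leadRun v t : Int) + 1) + v) (v + 1) * (v + 1)
      + G (t.drop (leadRun v t))
termination_by l => l.length
decreasing_by simp [List.length_drop]

theorem G_nil : G [] = 0 := by rw [G.eq_def]

theorem G_cons (v : Int) (t : List Int) :
    G (v :: t) = PySem.Int.floordiv (((leadRun v t : Int) + 1) + v) (v + 1) * (v + 1)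
      + G (t.drop (leadRun v t)) := by rw [G.eq_def]

theorem leadRun_decomp (v : Int) (t : List Int) :
    List.replicate (leadRun v t) v ++ t.drop (leadRun v t) = t := by
  induction t with
  | nil => simp [leadRun]
  | cons x t ih =>
    by_cases h : x = v
    · subst h
      simpa [leadRun, List.replicate_succ] using ih
    · simp [leadRun, h]

theorem leadRun_drop_head (v : Int) (t : List Int) :
    t.drop (leadRun v t) = [] ∨ ∃ r rs, t.drop (leadRun v t) = r :: rs ∧ r ≠ v := by
  induction t with
  | nil => left; simp
  | cons x t ih =>
    by_cases h : x = v
    · subst h; simpa [leadRun] using ih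
    · right; exact ⟨x, t, by simp [leadRun, h], h⟩

theorem leadRun_replicate_append (v : Int) (k : Nat) (rest : List Int)
    (hr : rest = [] ∨ ∃ r rs, rest = r :: rs ∧ r ≠ v) :
    leadRun v (List.replicate k v ++ rest) = k := by
  induction k with
  | zero =>
    rcases hr with h | ⟨r, rs, h, hne⟩
    · simp [h, leadRun]
    · simp [h, leadRun, hne]
  | succ k ih => simp [List.replicate_succ, leadRun, ih]

theorem pyGetD_append (pre ys : List Int) (k : Nat) :
    PySem.List.pyGetD (pre ++ ys) ((pre.length : Int) + (k : Int)) 0 = ys.getD k 0 := by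
  have h : ((pre.length : Int) + (k : Int)) = ((pre.length + k : Nat) : Int) := by push_cast; ring
  rw [h, PySem.List.pyGetD_natCast]
  simp [List.getD, List.getElem?_append_right]

theorem floordiv_one_of_le (c v : Int) (hv : 0 ≤ v) (h1 : 1 ≤ c) (h2 : c ≤ v + 1) :
    PySem.Int.floordiv (c + v) (v + 1) = 1 := by
  rw [PySem.Int.floordiv_eq_iff_of_pos (show (0:Int) < v + 1 by omega)]
  constructor <;> omega

theorem floordiv_step (c v : Int) (hv : 0 ≤ v) (h : v + 1 < c) :
    PySem.Int.floordiv (c + v) (v + 1) = 1 + PySem.Int.floordiv (c - (v + 1) + v) (v + 1) := by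
  rw [PySem.Int.floordiv_eq_ediv_of_pos (show (0:Int) < v + 1 by omega),
      PySem.Int.floordiv_eq_ediv_of_pos (show (0:Int) < v + 1 by omega)]
  have h2 : c + v = (c - (v + 1) + v) + 1 * (v + 1) := by ring
  rw [h2, Int.add_mul_ediv_right _ _ (show (v:Int) + 1 ≠ 0 by omega)]
  ring

-- B side: the fold computes G run by run (on any list)
theorem foldRun (l : List Int) : ∀ (tot v k : Int),
    bFlush (l.foldl bStep (tot, some v, k)) =
      tot + PySem.Int.floordiv ((k + (leadRun v l : Int)) + v) (v + 1) * (v + 1)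
        + G (l.drop (leadRun v l)) := by
  induction l with
  | nil => intro tot v k; simp [bFlush, leadRun, G_nil]
  | cons x t ih =>
    intro tot v k
    rw [List.foldl_cons]
    by_cases h : x = v
    · subst h
      have hb : bStep (tot, some x, k) x = (tot, some x, k + 1) := by simp [bStep]
      have hl : leadRun x (x :: t) = leadRun x t + 1 := by simp [leadRun]
      rw [hb, ih, hl, List.drop_succ_cons]
      push_cast; ring
    · have hb : bStep (tot, some v, k) x
          = (tot + PySem.Int.floordiv (k + v) (v + 1) * (v + 1), some x, 1) := by
        simp [bStep, h]
      have hl0 : leadRun v (x :: t) = 0 := by simp [leadRun, h]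
      rw [hb, ih, hl0, List.drop_zero]
      rw [G_cons]
      push_cast; ring

theorem b_eq_G (s : List Int) : bFlush (s.foldl bStep (0, none, 0)) = G s := by
  cases s with
  | nil => simp [bFlush, G_nil]
  | cons v t =>
    rw [List.foldl_cons]
    have hb : bStep ((0 : Int), (none : Option Int), (0 : Int)) v = (0, some v, 1) := by
      simp [bStep]
    rw [hb, foldRun, G_cons]
    push_cast; ring

-- A side, inner loop: on s = pre ++ replicate c v ++ rest (rest not starting with v),
-- the inner loop started at offset t reaches offset m = min c (v+1).toNat
theorem innerRun (pre rest : List Int) (c : Nat) (v : Int) (hv : 0 ≤ v)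
    (hr : rest = [] ∨ ∃ r rs, rest = r :: rs ∧ r ≠ v) :
    ∀ (fuel t : Nat), t ≤ min c (v + 1).toNat → min c (v + 1).toNat - t ≤ fuel →
    aInner (pre ++ (List.replicate c v ++ rest)) ((pre ++ (List.replicate c v ++ rest)).length : Int)
        v (pre.length : Int) ((pre.length : Int) + (t : Int)) fuel
      = (pre.length : Int) + ((min c (v + 1).toNat : Nat) : Int) := by
  intro fuel
  induction fuel with
  | zero =>
    intro t ht hfuel
    have h : t = min c (v + 1).toNat := by omega
    rw [h]; rfl
  | succ fuel ih =>
    intro t ht hfuel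
    by_cases htm : t = min c (v + 1).toNat
    · -- loop guard is false at the final offset
      subst htm
      rw [aInner, if_neg]
      rintro ⟨hlt, heq, hcmp⟩
      by_cases hc : c ≤ (v + 1).toNat
      · -- final offset = c : s[i+c] is rest's head (≠ v) or out of range
        have hmc : min c (v + 1).toNat = c := by omega
        rw [hmc] at hlt heq
        rcases hr with hre | ⟨r, rs, hre, hne⟩
        · have hlen : (pre ++ (List.replicate c v ++ rest)).length = pre.length + c := by
            simp [hre]
          rw [hlen] at hlt
          omega
        · have hg : PySem.List.pyGetD (pre ++ (List.replicate c v ++ rest))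
              ((pre.length : Int) + (c : Int)) 0 = r := by
            rw [pyGetD_append]
            simp [hre, List.getD, List.getElem?_append_right]
          rw [hg] at heq
          exact hne heq
      · -- final offset = v+1 : the bound j-i-1 < val fails
        have hmv : ((min c (v + 1).toNat : Nat) : Int) = v + 1 := by
          have h1 : min c (v + 1).toNat = (v + 1).toNat := by omega
          rw [h1]; omega
        omega
    · -- guard holds: one more step
      have htlt : t < min c (v + 1).toNat := by omega
      have htc : t < c := by omega
      have hcond : ((pre.length : Int) + (t : Int)) < ((pre ++ (List.replicate c v ++ rest)).length : Int) ∧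
          PySem.List.pyGetD (pre ++ (List.replicate c v ++ rest)) ((pre.length : Int) + (t : Int)) 0 = v ∧
          ((pre.length : Int) + (t : Int)) - (pre.length : Int) - 1 < v := by
        refine ⟨?_, ?_, ?_⟩
        · have hlen : (pre ++ (List.replicate c v ++ rest)).length
              = pre.length + c + rest.length := by simp; omega
          rw [hlen]; push_cast; omega
        · rw [pyGetD_append]
          simp [List.getD, List.getElem?_append, htc]
        · have h1 : (t : Int) < v + 1 := by
            have h2 : t < (v + 1).toNat := by omega
            omega
          omega
      rw [aInner, if_pos hcond]
      have hstep : (pre.length : Int) + (t : Int) + 1 = (pre.length : Int) + ((t + 1 : Nat) : Int) := by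
        push_cast; ring
      rw [hstep]
      exact ih (t + 1) (by omega) (by omega)

-- A side, outer loop: processes the suffix run by run, accumulating G
theorem outerRun (s : List Int) (hpos : ∀ x ∈ s, 0 ≤ x) :
    ∀ (N : Nat) (suf pre : List Int) (rtv : Int) (fuel : Nat),
      suf.length ≤ N → pre ++ suf = s → suf.length + 1 ≤ fuel →
      aOuter s (s.length : Int) fuel (pre.length : Int) (pre.length : Int) rtv = rtv + G suf := by
  intro N
  induction N with
  | zero =>
    intro suf pre rtv fuel hN hsplit hfuel
    have hnil : suf = [] := by
      cases suf with
      | nil => rfl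
      | cons a b => simp at hN
    subst hnil
    obtain ⟨fuel', rfl⟩ : ∃ f, fuel = f + 1 := ⟨fuel - 1, by omega⟩
    rw [aOuter, if_neg (by simp_all)]
    rw [G_nil]; ring
  | succ N ih =>
    intro suf pre rtv fuel hN hsplit hfuel
    cases suf with
    | nil =>
      obtain ⟨fuel', rfl⟩ : ∃ f, fuel = f + 1 := ⟨fuel - 1, by omega⟩
      rw [aOuter, if_neg (by simp_all)]
      rw [G_nil]; ring
    | cons v t =>
      obtain ⟨fuel', rfl⟩ : ∃ f, fuel = f + 1 := ⟨fuel - 1, by omega⟩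
      -- run decomposition of the suffix
      set k := leadRun v t with hk
      set rest := t.drop k with hrest
      have hdec : v :: t = List.replicate (k + 1) v ++ rest := by
        rw [List.replicate_succ, List.cons_append]
        rw [hrest, hk, leadRun_decomp]
      have hr : rest = [] ∨ ∃ r rs, rest = r :: rs ∧ r ≠ v := leadRun_drop_head v t
      have hv : 0 ≤ v := hpos v (by rw [← hsplit]; simp)
      set c := k + 1 with hc
      set m := min c (v + 1).toNat with hm
      have hm1 : 1 ≤ m := by
        have : 1 ≤ (v + 1).toNat := by omega
        omega
      have hmc : m ≤ c := by omega
      have hs : s = pre ++ (List.replicate c v ++ rest) := by rw [← hsplit, hdec]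
      -- unfold one outer iteration
      rw [aOuter]
      have hi : (pre.length : Int) < (s.length : Int) := by
        rw [hs]; simp; omega
      rw [if_pos hi]
      -- the value read is v
      have hval : PySem.List.pyGetD s (pre.length : Int) 0 = v := by
        have h0 : (pre.length : Int) = (pre.length : Int) + ((0 : Nat) : Int) := by simp
        rw [hs, h0, pyGetD_append]
        simp [hc, List.replicate_succ, List.getD]
      -- the inner loop reaches offset m
      have hinner : aInner s (s.length : Int) v (pre.length : Int) (pre.length : Int) s.length
          = (pre.length : Int) + (m : Int) := by
        have h2 := innerRun pre rest c v hv hr ((pre ++ (List.replicate c v ++ rest)).length) 0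
          (by omega) (by simp only [List.length_append, List.length_replicate]; omega)
        rw [Nat.cast_zero, add_zero] at h2
        rw [hs]
        exact h2
      simp only [hval, hinner]
      -- recurse on the shorter suffix
      have hpre' : (pre.length : Int) + (m : Int) = (((pre ++ List.replicate m v).length : Nat) : Int) := by
        simp
      have hsplit' : (pre ++ List.replicate m v) ++ (List.replicate (c - m) v ++ rest) = s := by
        rw [hs, List.append_assoc, ← List.append_assoc (List.replicate m v),
            List.replicate_append_replicate]
        have : m + (c - m) = c := by omega
        rw [this]
      have hlsuf : t.length + 1 = c + rest.length := by
        have h4 : (v :: t).length = (List.replicate c v ++ rest).length := by rw [hdec]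
        simp only [List.length_cons, List.length_append, List.length_replicate] at h4
        omega
      have hlen' : (List.replicate (c - m) v ++ rest).length ≤ N := by
        simp only [List.length_append, List.length_replicate]
        simp only [List.length_cons] at hN
        omega
      have hfuel' : (List.replicate (c - m) v ++ rest).length + 1 ≤ fuel' := by
        simp only [List.length_append, List.length_replicate]
        simp only [List.length_cons] at hfuel
        omega
      rw [hpre']
      rw [ih (List.replicate (c - m) v ++ rest) (pre ++ List.replicate m v) (rtv + v + 1) fuel'
        hlen' hsplit' hfuel']
      -- arithmetic: G (v :: t) = (v+1) + G (suffix after the consumed chunk)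
      have hGsuf : G (v :: t) = PySem.Int.floordiv ((c : Int) + v) (v + 1) * (v + 1) + G rest := by
        rw [G_cons, ← hk, ← hrest]
        rw [show ((k : Nat) : Int) + 1 + v = ((c : Nat) : Int) + v by push_cast [hc]; ring]
      by_cases hcle : c ≤ (v + 1).toNat
      · -- whole run consumed in one iteration
        have hmc' : m = c := by omega
        have hrepl0 : List.replicate (c - m) v = ([] : List Int) := by
          rw [hmc']; simp
        rw [hrepl0, List.nil_append]
        rw [hGsuf, floordiv_one_of_le (c : Int) v hv (by omega) (by omega)]
        ring
      · -- a chunk of v+1 consumed; a run of c-m copies of v remains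
        have hmv : m = (v + 1).toNat := by omega
        have hmvi : ((m : Nat) : Int) = v + 1 := by rw [hmv]; omega
        obtain ⟨q, hq⟩ : ∃ q, c - m = q + 1 := ⟨c - m - 1, by omega⟩
        rw [hq, List.replicate_succ, List.cons_append, G_cons]
        have hlr : leadRun v (List.replicate q v ++ rest) = q :=
          leadRun_replicate_append v q rest hr
        rw [hlr]
        have hdrop : (List.replicate q v ++ rest).drop q = rest := by
          have h3 := List.drop_left (l₁ := List.replicate q v) (l₂ := rest)
          simpa using h3
        rw [hdrop, hGsuf]
        have hcast : ((q : Nat) : Int) + 1 = (c : Int) - (v + 1) := by omega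
        rw [hcast, floordiv_step (c : Int) v hv (by omega)]
        ring

-- ===== VERDICT (by name: the statement is the Claim_ definition above) =====
theorem minEmployee_spec : Claim_equal_minEmployee := by
  intro nums _hdom hpre
  unfold Spec_minEmployee minEmployee minEmployee_alt
  set s := PySem.List.sorted nums (fun x => x) false with hs
  have hlen : s.length = nums.length := PySem.List.length_sorted nums (fun x => x) false
  have hpos : ∀ x ∈ s, 0 ≤ x := by
    intro x hx
    exact hpre x (by rwa [PySem.List.mem_sorted] at hx)
  have hmain := outerRun s hpos s.length s [] 0 (s.length + 1) (le_refl _) rfl (by omega)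
  simp only [List.length_nil, Nat.cast_zero] at hmain
  show aOuter s ((nums.length : Nat) : Int) (nums.length + 1) 0 0 0
      = bFlush (s.foldl bStep (0, none, 0))
  rw [show ((nums.length : Nat) : Int) = ((s.length : Nat) : Int) by rw [hlen],
      show nums.length + 1 = s.length + 1 by rw [hlen]]
  rw [hmain, b_eq_G]
  ring
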